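/-
  THE LANGUAGE jsmn ACCEPTS, PART 5: WHICH RULES OF RFC 8259 ARE NOT ENFORCED — as general theorems (the single examples are in
  Json/Jsmn/AcceptTable.lean).

    R1  brackets_ignores        the bracket check of the default build looks at `{ } [ ]` only: colons, commas, strings and primitives can
                                be inserted or removed anywhere without changing it. (No rule "comma between elements", "colon after a key",
                                "a key is a string", "a key has one value", "one value at top level" exists in the default build.)
    R2  default_any_word        NUMBERS AND LITERALS: in the default build every run of printable bytes without , : ] } that does not start
                                with { [ " is ONE primitive, accepted at top level with the answer 1 — whatever it spells.
        strict_any_word         in the strict build the same holds inside an array for every run that starts with - 0…9 t f n; the run may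
                                even contain `:` (answer 2: the array and the primitive).
    R3  string_any_bytes        STRINGS: between the quotes every byte but NUL `"` `\` is skipped: control characters, DEL, bytes ≥ 80H
                                in any combination (no UTF-8 check), in both builds.
    At the end: the three recognisers as Boolean functions (`countAccepts`, `defaultAccepts`, `strictAccepts`) with their
    `…_iff` theorems (accepted by jsmn_parse ⟺ the function answers true), and `languages_differ`: neither build's language contains the other's.
-/
import Json.Jsmn.AcceptLangTokMain
import Json.Jsmn.AcceptLangCount
import Json.Jsmn.AcceptLangStrictMain
set_option linter.unusedSimpArgs false

namespace Jsmn.AcceptLang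
open Jsmn

/-! ### R1 -/

/-- `{` `}` `[` `]`. -/
def Item.isBracket : Item → Bool
  | .objOpen | .arrOpen | .objClose | .arrClose => true
  | _ => false

/-- **R1.** The bracket check of the default build sees the brackets only. -/
theorem brackets_ignores (items : List Item) : ∀ st, brackets st items = brackets st (items.filter Item.isBracket) := by
  induction items with
  | nil => intro st; rfl
  | cons i is ih =>
    intro st
    cases i <;> simp only [List.filter_cons, Item.isBracket, if_true, Bool.false_eq_true, if_false]
    case objOpen => simp only [brackets]; exact ih _
    case arrOpen => simp only [brackets]; exact ih _
    case objClose =>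
      cases st with
      | nil => rfl
      | cons k st' =>
        simp only [brackets]
        split
        · exact ih _
        · rfl
    case arrClose =>
      cases st with
      | nil => rfl
      | cons k st' =>
        simp only [brackets]
        split
        · exact ih _
        · rfl
    case colon => simp only [brackets]; exact ih _
    case comma => simp only [brackets]; exact ih _
    case str => simp only [brackets]; exact ih _
    case prim => simp only [brackets]; exact ih _


/-! ### R2 -/

/-- A byte that can stand inside a primitive: printable (21H … 7EH) and not a stop character (`,` `]` `}`, and `:` unless strict). -/
def wordByte (strict : Bool) (c : UInt8) : Bool :=
  !notPrintable c && c != 0x20 && c != 0x2c && c != 0x5d && c != 0x7d && (strict || c != 0x3a)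

theorem wordByte_facts {strict : Bool} {c : UInt8} (h : wordByte strict c = true) :
    notPrintable c = false ∧ c ≠ 0 ∧ isWs c = false ∧ c ≠ 0x2c ∧ c ≠ 0x5d ∧ c ≠ 0x7d ∧ (strict = false → c ≠ 0x3a) := by
  simp only [wordByte, Bool.and_eq_true, Bool.not_eq_true', bne_iff_ne, ne_eq, Bool.or_eq_true] at h
  obtain ⟨⟨⟨⟨⟨hp, h20⟩, h2c⟩, h5d⟩, h7d⟩, h3a⟩ := h
  refine ⟨hp, ?_, ?_, h2c, h5d, h7d, ?_⟩
  · intro h; subst h; simp [notPrintable] at hp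
  · simp only [isWs, Bool.or_eq_false_iff, beq_eq_false_iff_ne, ne_eq]
    refine ⟨⟨⟨?_, ?_⟩, ?_⟩, h20⟩ <;> (intro h; subst h; simp [notPrintable] at hp)
  · intro hs; rcases h3a with h | h
    · rw [hs] at h; cases h
    · exact h

/-- Inside a primitive the lexer skips every `wordByte`. -/
theorem lex_prim_word (strict : Bool) (w rest : List UInt8) (hw : ∀ x ∈ w, wordByte strict x = true) :
    lex strict .prim (w ++ rest) = lex strict .prim rest := by
  induction w with
  | nil => rfl
  | cons x w ih =>
    obtain ⟨hp, h0, hws, h2c, h5d, h7d, h3a⟩ := wordByte_facts (hw x (by simp))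
    have := ih (fun y hy => hw y (by simp [hy]))
    cases strict with
    | false => simp [lex, h0, hws, h2c, h5d, h7d, h3a rfl, hp, this]
    | true => simp [lex, h0, hws, h2c, h5d, h7d, hp, this]

/-- **R2, default build.** Any run of printable bytes without `,` `:` `]` `}` that does not start with `{` `[` `"` is accepted as ONE
primitive (with `token_mode_default`: jsmn_parse answers 1) — `+1`, `0x1F`, `NaN`, `tru`, `1"a"`, `a{b` … -/
theorem default_any_word (c : UInt8) (w : List UInt8) (hc : wordByte false c = true) (h1 : c ≠ 0x7b) (h2 : c ≠ 0x5b) (h3 : c ≠ 0x22)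
    (hw : ∀ x ∈ w, wordByte false x = true) :
    lex false .top (c :: w) = ([.prim], .eof) ∧ tokenResult (lex false .top (c :: w)) = 1 := by
  obtain ⟨hp, h0, hws, h2c, h5d, h7d, h3a⟩ := wordByte_facts hc
  have hl : lex false .top (c :: w) = ([.prim], .eof) := by
    have := lex_prim_word false w [] hw
    rw [List.append_nil] at this
    simp [lex, h0, h1, h2, h3, hws, h2c, h5d, h7d, h3a rfl, hp, this, push]
  exact ⟨hl, by rw [hl]; decide⟩

/-- **R2, strict build.** Inside an array, any run of printable bytes without `,` `]` `}` that starts with `-`, a digit, `t`, `f` or `n`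
is accepted as ONE primitive (with `token_mode_strict`: jsmn_parse answers 2) — `[tru]`, `[-]`, `[0x1F]`, `[1:2]`, `[1"a"]` … -/
theorem strict_any_word (c : UInt8) (w : List UInt8) (hc : primStart c = true) (hw : ∀ x ∈ w, wordByte true x = true) :
    lex true .top (0x5b :: c :: (w ++ [0x5d])) = ([.arrOpen, .prim, .arrClose], .eof) ∧
      strictResult (lex true .top (0x5b :: c :: (w ++ [0x5d]))) = 2 := by
  have hp := primStart_printable hc
  have hl : lex true .top (0x5b :: c :: (w ++ [0x5d])) = ([.arrOpen, .prim, .arrClose], .eof) := by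
    have hw' := lex_prim_word true w [0x5d] hw
    have hcs : c ≠ 0 ∧ c ≠ 0x7b ∧ c ≠ 0x5b ∧ c ≠ 0x7d ∧ c ≠ 0x5d ∧ c ≠ 0x22 ∧ isWs c = false ∧ c ≠ 0x3a ∧ c ≠ 0x2c := by
      simp only [primStart, Bool.or_eq_true, beq_iff_eq, Bool.and_eq_true, decide_eq_true_eq] at hc
      rcases hc with (((h | h) | h) | h) | h
      · subst h; decide
      · refine ⟨?_, ?_, ?_, ?_, ?_, ?_, ?_, ?_, ?_⟩ <;> try (intro hh; subst hh; simp at h)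
        simp only [isWs, Bool.or_eq_false_iff, beq_eq_false_iff_ne, ne_eq]
        refine ⟨⟨⟨?_, ?_⟩, ?_⟩, ?_⟩ <;> (intro hh; subst hh; simp at h)
      · subst h; decide
      · subst h; decide
      · subst h; decide
    obtain ⟨c0, c1, c2, c3, c4, c5, c6, c7, c8⟩ := hcs
    have h5 : lex true .top (c :: (w ++ [0x5d])) = push .prim (lex true .prim (w ++ [0x5d])) := by
      simp [lex, c0, c1, c2, c3, c4, c5, c6, c7, c8, hc]
    have h6 : lex true .prim [0x5d] = ([.arrClose], .eof) := by decide
    have h0 : lex true .top (0x5b :: c :: (w ++ [0x5d])) = push .arrOpen (lex true .top (c :: (w ++ [0x5d]))) := by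
      simp [lex]
    rw [h0, h5, hw', h6]; rfl
  exact ⟨hl, by rw [hl]; decide⟩

/-! ### R3 -/

/-- Inside a string the lexer skips every byte but NUL, `"` and `\`. -/
theorem lex_str_bytes (strict : Bool) (w rest : List UInt8) (hw : ∀ x ∈ w, x ≠ 0 ∧ x ≠ 0x22 ∧ x ≠ 0x5c) :
    lex strict (.str 0) (w ++ rest) = lex strict (.str 0) rest := by
  induction w with
  | nil => rfl
  | cons x w ih =>
    obtain ⟨h0, h1, h2⟩ := hw x (by simp)
    have := ih (fun y hy => hw y (by simp [hy]))
    simp [lex, h0, h1, h2, this]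

/-- **R3.** A string may contain any bytes but NUL, `"`, `\` (control characters, DEL, bytes from 80H on, in any order): the lexer reports
one string and goes on behind the closing quote. Both builds. -/
theorem string_any_bytes (strict : Bool) (w rest : List UInt8) (hw : ∀ x ∈ w, x ≠ 0 ∧ x ≠ 0x22 ∧ x ≠ 0x5c) :
    lex strict .top (0x22 :: (w ++ 0x22 :: rest)) = push .str (lex strict .top rest) := by
  have h := lex_str_bytes strict w (0x22 :: rest) hw
  have h2 : lex strict (.str 0) (0x22 :: rest) = lex strict .top rest := by simp [lex]
  have h1 : lex strict .top (0x22 :: (w ++ 0x22 :: rest)) = push .str (lex strict (.str 0) (w ++ 0x22 :: rest)) := by simp [lex]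
  rw [h1, h, h2]


/-! ### The three recognisers, as Boolean functions on the text -/

/-- The counting mode (tokens == NULL) accepts `js`. -/
def countAccepts (strict : Bool) (js : List UInt8) : Bool := (lex strict .top js).2 == .eof

/-- The token mode of the default build accepts `js` (given enough tokens). -/
def defaultAccepts (js : List UInt8) : Bool :=
  (lex false .top js).2 == .eof && brackets [] (lex false .top js).1 == some []

/-- The token mode of the strict build with parent links accepts `js` (given enough tokens). -/
def strictAccepts (js : List UInt8) : Bool :=
  (lex true .top js).2 == .eof &&
    match strictRun [] (-1) (lex true .top js).1 with
    | none => false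
    | some (ns, _) => !ns.any (·.isOpen)

theorem countAccepts_iff (cfg : Config) (js : List UInt8) (n : Nat) (hL : js.length < 2147483648) :
    (∃ r, 0 ≤ r ∧ run cfg js none n = some (r, none)) ↔ countAccepts cfg.strict js = true := by
  rw [count_mode_accepts cfg js n hL]; simp [countAccepts]

theorem defaultAccepts_iff (js : List UInt8) (ts : Tokens) (n : Nat) (hL : js.length < 2147483648) (hts : ts.length = n)
    (hn : js.length ≤ n) :
    (∃ r ts', 0 ≤ r ∧ run .default js (some ts) n = some (r, some ts')) ↔ defaultAccepts js = true := by
  rw [token_mode_default_accepts js ts n hL hts (Nat.le_trans (tokCount_lex_le false js .top) hn)]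
  simp [defaultAccepts]

theorem strictAccepts_iff (js : List UInt8) (ts : Tokens) (n : Nat) (hL : js.length < 2147483648) (hts : ts.length = n)
    (hn : js.length ≤ n) :
    (∃ r ts', 0 ≤ r ∧ run .strictLinks js (some ts) n = some (r, some ts')) ↔ strictAccepts js = true := by
  rw [token_mode_strict_accepts js ts n hL hts (Nat.le_trans (tokCount_lex_le true js .top) hn)]
  simp only [strictAccepts, Bool.and_eq_true, beq_iff_eq]
  cases hr : strictRun [] (-1) (lex true .top js).1 with
  | none => simp
  | some x => obtain ⟨ns, sup⟩ := x; simp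

/-- Neither build's language contains the other's: `{}:}` is accepted by the strict build (with parent links) only, `{a:1}` by the default
build only; and the counting mode accepts `]`, which both token modes reject. -/
theorem languages_differ :
    strictAccepts (ascii "{}:}") = true ∧ defaultAccepts (ascii "{}:}") = false ∧
    defaultAccepts (ascii "{a:1}") = true ∧ strictAccepts (ascii "{a:1}") = false ∧
    countAccepts false (ascii "]") = true ∧ countAccepts true (ascii "]") = true ∧
    defaultAccepts (ascii "]") = false ∧ strictAccepts (ascii "]") = false := by decide

/-- RFC 8259's `42` is rejected by the strict build and accepted when a space follows. -/
theorem strict_rejects_42 : strictAccepts (ascii "42") = false ∧ strictAccepts (ascii "42 ") = true ∧ defaultAccepts (ascii "42") = true := by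
  decide

end Jsmn.AcceptLang
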